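-- pv_equiv track=rewrite | github.com/tarunganesh2004/Python-practice | Lex Assignments/Assignment set 4/stringlevel3.py | othersimpleMethod
-- ===== SOURCE A (Python) =====
-- def othersimpleMethod(data):
--     words=data.split(" ")
--     def encode(word):
--         v="aeiouAEIOU"
--         if all(ch in v for ch in word):
--             return word
--         return ''.join([ch for ch in word if ch not in v])
--
--     return ' '.join([encode(word) for word in words])
-- ===== SOURCE B (Python) =====
-- def othersimpleMethod(data):
--     # Strip all vowels from the whole string in one global translate pass
--     # (spaces survive, so the stripped string splits into the per-word
--     # stripped forms), then zip with the original words: keep the original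
--     # word exactly when its stripped counterpart is empty (all-vowel word).
--     stripped = data.translate(str.maketrans('', '', "aeiouAEIOU"))
--     return ' '.join(w if s == "" else s
--                     for w, s in zip(data.split(" "), stripped.split(" ")))
-- ===== Notes on version B (the rewrite author's own statement) =====
-- stated objective: faster
-- what changed: B replaces A's per-word all-vowels scan plus per-word character-loop vowel removal with one global str.translate pass stripping vowels from the whole string, then zips the split of the original with the split of the stripped string, keeping the original word exactly when its stripped counterpart is empty.
import Mathlib
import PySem

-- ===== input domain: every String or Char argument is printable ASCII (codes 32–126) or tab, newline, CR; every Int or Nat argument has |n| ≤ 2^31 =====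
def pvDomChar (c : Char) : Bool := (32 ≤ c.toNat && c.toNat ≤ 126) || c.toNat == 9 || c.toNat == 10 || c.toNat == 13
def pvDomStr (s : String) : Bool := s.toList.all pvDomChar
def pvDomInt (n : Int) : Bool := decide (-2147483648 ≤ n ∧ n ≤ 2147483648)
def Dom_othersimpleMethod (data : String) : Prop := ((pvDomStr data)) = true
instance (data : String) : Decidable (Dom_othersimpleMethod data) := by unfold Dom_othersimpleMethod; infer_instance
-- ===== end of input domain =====

-- B strips vowels from the whole string in ONE global pass, then zips the split of the
-- original with the split of the stripped string, keeping the original word exactly when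
-- its stripped counterpart is empty — replacing A's per-word all-vowels scan plus
-- per-word vowel removal (objective: alternative).

-- ===== PORT A =====
def pvVowels : List Char := "aeiouAEIOU".toList

def pvEncodeA (word : String) : String :=
  if word.toList.all (fun ch => pvVowels.contains ch) then word
  else String.ofList (word.toList.filter (fun ch => !pvVowels.contains ch))

def othersimpleMethod (data : String) : String :=
  PySem.Str.join " " (((PySem.Str.split? data " ").getD []).map pvEncodeA)

-- ===== PORT B =====
-- Source B's data.translate(str.maketrans('', '', "aeiouAEIOU")) deletes exactly the vowel
-- characters; it is ported exactly as a filter over the string's characters.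
def othersimpleMethod_alt (data : String) : String :=
  let stripped := String.ofList (data.toList.filter (fun ch => !pvVowels.contains ch))
  PySem.Str.join " "
    ((List.zip ((PySem.Str.split? data " ").getD []) ((PySem.Str.split? stripped " ").getD [])).map
      (fun ws => if ws.2 = "" then ws.1 else ws.2))

-- ===== PRECONDITION & SPEC =====
def Spec_othersimpleMethod (data : String) (out : String) : Prop := out = othersimpleMethod_alt data
instance (data : String) (out : String) : Decidable (Spec_othersimpleMethod data out) := by unfold Spec_othersimpleMethod; infer_instance

-- ===== CLAIM (what is proved, stated in full; the proofs are below) =====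
def Claim_equal_othersimpleMethod : Prop := ∀ (data : String), Dom_othersimpleMethod data → Spec_othersimpleMethod data (othersimpleMethod data)

-- ===== LEMMAS AND PROOFS =====

-- simple structural single-character split, used only to reason about PySem's splitOn
def pvSplitCh (c : Char) (pre : List Char) : List Char → List (List Char)
  | [] => [pre]
  | x :: xs => if x = c then pre :: pvSplitCh c [] xs else pvSplitCh c (pre ++ [x]) xs

lemma go_eq_splitCh (c : Char) :
    ∀ (fuel : Nat) (l cur : List Char) (acc : List (List Char)), l.length < fuel →
      PySem.Chars.splitOn.go [c] fuel l cur acc = acc.reverse ++ pvSplitCh c cur.reverse l := by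
  intro fuel
  induction fuel with
  | zero => intro l cur acc h; omega
  | succ n ih =>
    intro l cur acc h
    cases l with
    | nil => simp [PySem.Chars.splitOn.go, pvSplitCh]
    | cons x xs =>
      simp only [PySem.Chars.splitOn.go]
      by_cases hx : x = c
      · subst hx
        have hpre : List.isPrefixOf [x] (x :: xs) = true := by simp [List.isPrefixOf]
        have hdrop : List.drop [x].length (x :: xs) = xs := by simp
        simp only [hpre, if_pos, hdrop]
        rw [ih xs [] (cur.reverse :: acc) (by simpa using Nat.lt_of_succ_lt_succ h)]
        simp [pvSplitCh]
      · have hpre : List.isPrefixOf [c] (x :: xs) = false := by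
          simp [List.isPrefixOf]; exact fun hcx => absurd hcx.symm hx
        rw [if_neg (by simp [hpre])]
        rw [ih xs (x :: cur) acc (by simpa using Nat.lt_of_succ_lt_succ h)]
        simp [pvSplitCh, hx]

lemma splitOn_single (c : Char) (l : List Char) :
    PySem.Chars.splitOn l [c] = pvSplitCh c [] l := by
  unfold PySem.Chars.splitOn
  rw [go_eq_splitCh c (l.length + 1) l [] [] (by omega)]
  simp

lemma splitCh_filter (c : Char) (q : Char → Bool) (hq : q c = true) :
    ∀ (l pre : List Char),
      pvSplitCh c (pre.filter q) (l.filter q) = (pvSplitCh c pre l).map (List.filter q) := by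
  intro l
  induction l with
  | nil => intro pre; simp [pvSplitCh]
  | cons x xs ih =>
    intro pre
    by_cases hqx : q x = true
    · by_cases hx : x = c
      · subst hx
        simp only [List.filter_cons, hqx, if_true, pvSplitCh, List.map_cons]
        have := ih []
        simpa using this
      · have hfx : List.filter q (pre ++ [x]) = List.filter q pre ++ [x] := by
          simp [List.filter_append, hqx]
        simp only [List.filter_cons, hqx, if_true, pvSplitCh, if_neg hx]
        rw [← hfx]
        exact ih (pre ++ [x])
    · have hx : x ≠ c := by
        intro h; rw [h, hq] at hqx; exact hqx rfl
      have hfx : List.filter q (pre ++ [x]) = List.filter q pre := by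
        simp [List.filter_append, hqx]
      have hstep : pvSplitCh c pre (x :: xs) = pvSplitCh c (pre ++ [x]) xs := by
        simp [pvSplitCh, hx]
      simp only [List.filter_cons, hqx, hstep]
      rw [← hfx]
      exact ih (pre ++ [x])

lemma mk_eq_empty_iff (l : List Char) : String.ofList l = "" ↔ l = [] := by
  constructor
  · intro h; have := congrArg String.toList h; simpa [String.toList_ofList] using this
  · rintro rfl; rfl

lemma filter_nil_iff_all (l : List Char) :
    l.filter (fun ch => !pvVowels.contains ch) = [] ↔
      l.all (fun ch => pvVowels.contains ch) = true := by
  simp [List.filter_eq_nil_iff, List.all_eq_true]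

-- ===== VERDICT (by name: the statement is the Claim_ definition above) =====
theorem othersimpleMethod_spec : Claim_equal_othersimpleMethod := by
  intro data _
  unfold Spec_othersimpleMethod othersimpleMethod othersimpleMethod_alt
  have hT : (" " : String).toList = [' '] := by decide
  have hsplit : ∀ s : String,
      (PySem.Str.split? s " ").getD [] = (pvSplitCh ' ' [] s.toList).map String.ofList := by
    intro s; simp [PySem.Str.split?, PySem.Chars.split?, hT, splitOn_single]
  simp only [hsplit, String.toList_ofList]
  have hcomm := splitCh_filter ' ' (fun ch => !pvVowels.contains ch) (by decide) data.toList []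
  simp only [List.filter_nil] at hcomm
  rw [hcomm]
  simp only [List.map_map]
  rw [List.zip_map']
  simp only [List.map_map]
  apply congrArg
  apply List.map_congr_left
  intro p _
  simp only [Function.comp_apply]
  by_cases hall : p.all (fun ch => pvVowels.contains ch) = true
  · have hf : p.filter (fun ch => !pvVowels.contains ch) = [] := (filter_nil_iff_all p).mpr hall
    simp [pvEncodeA, String.toList_ofList]
  · have hf : ¬ p.filter (fun ch => !pvVowels.contains ch) = [] := by
      rw [filter_nil_iff_all]; exact hall
    simp only [pvEncodeA, String.toList_ofList, hall]
    exact (if_neg (fun h => hf ((mk_eq_empty_iff _).mp h))).symm
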